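-- pv_equiv track=rewrite | github.com/David-Tong/lintcode-in-python | 437-copy books/main.py | copy_books
-- ===== SOURCE A (Python) =====
-- def copy_books(pages, k):
--     # write your code here
--     def can_copy_books(pages, k, time):
--         copied_pages = 0
--         used_people = 1
--         for page in pages:
--             if page > time:
--                 return False
--             if copied_pages + page > time:
--                 used_people += 1
--                 copied_pages = page
--             else:
--                 copied_pages += page
--             if used_people > k:
--                 return False
--         return True
--
--     L = len(pages)
--     if L == 0:
--         return 0
--
--     left = 0
--     right = sum(pages)
--
--     while left + 1 < right:
--         middle = (left + right) // 2
--         if can_copy_books(pages, k, middle):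
--             right = middle
--         else:
--             left = middle + 1
--
--     if can_copy_books(pages, k, left):
--         return left
--     elif can_copy_books(pages, k, right):
--         return right
-- ===== SOURCE B (Python) =====
-- def best(dp, prefix, i):
--     b = None
--     for j in range(i + 1):
--         if dp[j] is None:
--             continue
--         c = max(dp[j], prefix[i] - prefix[j])
--         if b is None or c < b:
--             b = c
--     return b
--
-- def copy_books(pages, k):
--     L = len(pages)
--     if L == 0:
--         return 0
--     prefix = [0]
--     s = 0
--     for p in pages:
--         s += p
--         prefix.append(s)
--     dp = [0] + [None] * L
--     for _ in range(min(k, L)):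
--         dp = [best(dp, prefix, i) for i in range(L + 1)]
--     return dp[L]
-- ===== Notes on version B (the rewrite author's own statement) =====
-- stated objective: alternative
-- what changed: Replaces binary search on the answer with a greedy feasibility test by a bottom-up dynamic program over (copiers, prefix of books) using prefix sums: dp[i] = minimal achievable maximum load for the first i books, refined once per copier; the answer is read off dp[len(pages)], with None when no assignment exists.
-- outside the precondition, e.g. on copy_books([5, 10, 1, -3, -5, 11, 6], 2): A returns 17, B returns 13; on copy_books([3, -2], 2): A returns None, B returns 1
import Mathlib
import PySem

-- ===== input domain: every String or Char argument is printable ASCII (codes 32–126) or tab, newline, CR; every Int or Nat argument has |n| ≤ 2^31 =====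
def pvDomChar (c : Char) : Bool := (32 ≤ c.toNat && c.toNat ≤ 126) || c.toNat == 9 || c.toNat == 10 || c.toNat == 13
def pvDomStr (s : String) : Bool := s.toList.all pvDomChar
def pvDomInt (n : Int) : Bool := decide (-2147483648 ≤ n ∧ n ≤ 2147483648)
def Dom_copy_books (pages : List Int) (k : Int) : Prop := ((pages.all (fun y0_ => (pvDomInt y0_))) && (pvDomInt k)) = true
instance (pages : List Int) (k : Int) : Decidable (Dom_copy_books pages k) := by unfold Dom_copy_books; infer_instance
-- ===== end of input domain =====

-- B replaces A's binary search on the answer by a bottom-up dynamic program over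
-- (copiers, prefix of books) with prefix sums (objective: alternative; not faster).

-- ===== PORT A =====
-- helper can_copy_books: the for-loop with early returns becomes structural recursion
def canAux : List Int → Int → Int → Int → Int → Bool
  | [], _, _, _, _ => true
  | page :: rest, copied_pages, used_people, k, time =>
    if page > time then false
    else
      let used' := if copied_pages + page > time then used_people + 1 else used_people
      let copied' := if copied_pages + page > time then page else copied_pages + page
      if used' > k then false
      else canAux rest copied' used' k time

def can_copy_books (pages : List Int) (k time : Int) : Bool := canAux pages 0 1 k time

-- the while-loop on the interval [left, right]
def bsLoop (pages : List Int) (k left right : Int) : Int × Int :=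
  if left + 1 < right then
    let middle := PySem.Int.floordiv (left + right) 2
    if can_copy_books pages k middle then bsLoop pages k left middle
    else bsLoop pages k (middle + 1) right
  else (left, right)
termination_by (right - left).toNat
decreasing_by
  · rw [PySem.Int.floordiv_eq_ediv_of_pos (by norm_num)]
    omega
  · rw [PySem.Int.floordiv_eq_ediv_of_pos (by norm_num)]
    omega

def copy_books (pages : List Int) (k : Int) : Option Int :=
  if pages.length = 0 then some 0
  else
    let right : Int := pages.sum
    let lr := bsLoop pages k 0 right
    if can_copy_books pages k lr.1 then some lr.1
    else if can_copy_books pages k lr.2 then some lr.2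
    else none

-- ===== PORT B =====
-- helper best(dp, prefix, i): inner j-loop (dp[j]/prefix[j] are always in range, so getD is exact)
def pvBest (dp : List (Option Int)) (prefixL : List Int) (i : Nat) : Option Int :=
  (List.range (i + 1)).foldl
    (fun b j =>
      match dp.getD j none with
      | none => b
      | some w =>
        let c := max w (prefixL.getD i 0 - prefixL.getD j 0)
        match b with
        | none => some c
        | some bv => if c < bv then some c else some bv)
    none

-- prefix list: s accumulates the running sum, each value is appended
def pvPrefix (pages : List Int) : List Int :=
  (pages.foldl (fun (acc : Int × List Int) p => (acc.1 + p, acc.2 ++ [acc.1 + p])) (0, [0])).2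

def copy_books_alt (pages : List Int) (k : Int) : Option Int :=
  let L := pages.length
  if L = 0 then some 0
  else
    let prefixL := pvPrefix pages
    let dp0 : List (Option Int) := some 0 :: List.replicate L none
    let dp := (List.range (min k (L : Int)).toNat).foldl
      (fun dp _ => (List.range (L + 1)).map (fun i => pvBest dp prefixL i)) dp0
    dp.getD L none

-- ===== PRECONDITION & SPEC =====
-- Pre_ excludes lists containing a negative page count (kept only in the trivial cases k ≤ 0 or
-- the empty list): negative pages lie outside the task's natural domain and make A's greedy
-- feasibility test non-monotone in the time bound, so A's binary search returns accidental values.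
def Pre_copy_books (pages : List Int) (k : Int) : Prop :=
  pages = [] ∨ k ≤ 0 ∨ ∀ p ∈ pages, 0 ≤ p
instance (pages : List Int) (k : Int) : Decidable (Pre_copy_books pages k) := by
  unfold Pre_copy_books; infer_instance

def pvWitness_copy_books : List Int × Int := ([3, 1, 4], 2)

def Spec_copy_books (pages : List Int) (k : Int) (out : Option Int) : Prop := out = copy_books_alt pages k
instance (pages : List Int) (k : Int) (out : Option Int) : Decidable (Spec_copy_books pages k out) := by
  unfold Spec_copy_books; infer_instance

-- ===== CLAIM (what is proved, stated in full; the proofs are below) =====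
def Claim_equal_copy_books : Prop := ∀ (pages : List Int) (k : Int), Dom_copy_books pages k → Pre_copy_books pages k → Spec_copy_books pages k (copy_books pages k)

-- ===== LEMMAS AND PROOFS =====

-- ---- spec-side model of B's dynamic program ----

/-- sum of the first `i` pages -/
def pvS (pages : List Int) (i : ℕ) : Int := (pages.take i).sum

/-- the accumulator shape of B's inner minimisation loop -/
def pvFoldMin (f : ℕ → Option Int) (l : List ℕ) : Option Int :=
  l.foldl
    (fun b j =>
      match f j with
      | none => b
      | some c =>
        match b with
        | none => some c
        | some bv => if c < bv then some c else some bv)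
    none

/-- mathematical model of B's dp table: `mmS pages r i` is row `r`, column `i` -/
def mmS (pages : List Int) : ℕ → ℕ → Option Int
  | 0, i => if i = 0 then some 0 else none
  | r + 1, i =>
    pvFoldMin
      (fun j =>
        match mmS pages r j with
        | none => none
        | some w => some (max w (pvS pages i - pvS pages j)))
      (List.range (i + 1))

-- ---- generic facts about the minimisation fold ----

theorem pvFoldMinAux_none (f : ℕ → Option Int) (l : List ℕ) (b : Option Int) :
    l.foldl (fun b j => match f j with
      | none => b
      | some c => match b with | none => some c | some bv => if c < bv then some c else some bv) b = none
      ↔ (b = none ∧ ∀ j ∈ l, f j = none) := by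
  induction l generalizing b with
  | nil => simp
  | cons j l ih =>
    simp only [List.foldl_cons]
    rw [ih]
    cases hf : f j with
    | none =>
      constructor
      · rintro ⟨hb, hall⟩
        refine ⟨hb, ?_⟩
        intro x hx
        rcases List.mem_cons.mp hx with rfl | hx
        · exact hf
        · exact hall _ hx
      · rintro ⟨hb, hall⟩
        exact ⟨hb, fun x hx => hall x (List.mem_cons_of_mem _ hx)⟩
    | some c =>
      cases b with
      | none => simp [hf]
      | some bv => simp only [hf]; split_ifs <;> simp_all

theorem pvFoldMinAux_some (f : ℕ → Option Int) (l : List ℕ) (b : Option Int) (v : Int)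
    (h : l.foldl (fun b j => match f j with
      | none => b
      | some c => match b with | none => some c | some bv => if c < bv then some c else some bv) b = some v) :
    (b = some v ∨ ∃ j ∈ l, f j = some v) ∧ (∀ bv, b = some bv → v ≤ bv) ∧
      (∀ j ∈ l, ∀ w, f j = some w → v ≤ w) := by
  induction l generalizing b with
  | nil =>
    simp only [List.foldl_nil] at h
    exact ⟨Or.inl h, fun bv hb => by rw [h] at hb; injection hb with e; omega, by simp⟩
  | cons j l ih =>
    simp only [List.foldl_cons] at h
    cases hf : f j with
    | none =>
      simp only [hf] at h
      obtain ⟨hmem, hble, hall⟩ := ih _ h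
      refine ⟨?_, hble, ?_⟩
      · rcases hmem with hb | ⟨x, hx, hfx⟩
        · exact Or.inl hb
        · exact Or.inr ⟨x, List.mem_cons_of_mem _ hx, hfx⟩
      · intro x hx w hw
        rcases List.mem_cons.mp hx with rfl | hx
        · rw [hf] at hw; cases hw
        · exact hall x hx w hw
    | some c =>
      cases b with
      | none =>
        simp only [hf] at h
        obtain ⟨hmem, hble, hall⟩ := ih _ h
        refine ⟨?_, by simp, ?_⟩
        · rcases hmem with hb | ⟨x, hx, hfx⟩
          · exact Or.inr ⟨j, List.mem_cons_self, by rw [hf, hb]⟩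
          · exact Or.inr ⟨x, List.mem_cons_of_mem _ hx, hfx⟩
        · intro x hx w hw
          rcases List.mem_cons.mp hx with rfl | hx
          · rw [hf] at hw
            have : w = c := by injection hw with e; omega
            subst this
            exact hble _ rfl
          · exact hall x hx w hw
      | some bv =>
        simp only [hf] at h
        split_ifs at h with hc
        · obtain ⟨hmem, hble, hall⟩ := ih _ h
          refine ⟨?_, ?_, ?_⟩
          · rcases hmem with hb | ⟨x, hx, hfx⟩
            · exact Or.inr ⟨j, List.mem_cons_self, by rw [hf, hb]⟩
            · exact Or.inr ⟨x, List.mem_cons_of_mem _ hx, hfx⟩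
          · intro bv' hb'
            injection hb' with e
            have hvc := hble c rfl
            omega
          · intro x hx w hw
            rcases List.mem_cons.mp hx with rfl | hx
            · rw [hf] at hw
              injection hw with e
              have := hble c rfl
              omega
            · exact hall x hx w hw
        · obtain ⟨hmem, hble, hall⟩ := ih _ h
          refine ⟨?_, ?_, ?_⟩
          · rcases hmem with hb | ⟨x, hx, hfx⟩
            · exact Or.inl hb
            · exact Or.inr ⟨x, List.mem_cons_of_mem _ hx, hfx⟩
          · intro bv' hb'
            injection hb' with e
            have := hble bv rfl
            omega
          · intro x hx w hw
            rcases List.mem_cons.mp hx with rfl | hx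
            · rw [hf] at hw
              injection hw with e
              have := hble bv rfl
              omega
            · exact hall x hx w hw

theorem pvFoldMin_some (f : ℕ → Option Int) (l : List ℕ) (v : Int)
    (h : pvFoldMin f l = some v) :
    (∃ j ∈ l, f j = some v) ∧ ∀ j ∈ l, ∀ w, f j = some w → v ≤ w := by
  unfold pvFoldMin at h
  obtain ⟨hmem, _, hall⟩ := pvFoldMinAux_some f l none v h
  rcases hmem with hb | hm
  · cases hb
  · exact ⟨hm, hall⟩

theorem pvFoldMin_le (f : ℕ → Option Int) (l : List ℕ) (j : ℕ) (w : Int)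
    (hj : j ∈ l) (hf : f j = some w) :
    ∃ v, pvFoldMin f l = some v ∧ v ≤ w := by
  cases hres : pvFoldMin f l with
  | none =>
    exfalso
    unfold pvFoldMin at hres
    have := ((pvFoldMinAux_none f l none).mp hres).2 j hj
    rw [this] at hf
    cases hf
  | some v =>
    have h2 := pvFoldMin_some f l v hres
    exact ⟨v, rfl, h2.2 j hj w hf⟩

-- ---- B's port computes mmS ----

theorem pv_scan_aux : ∀ (l : List Int) (s : Int) (acc : List Int),
    (l.foldl (fun (acc : Int × List Int) p => (acc.1 + p, acc.2 ++ [acc.1 + p])) (s, acc)).2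
      = acc ++ (List.range l.length).map (fun i => s + (l.take (i + 1)).sum) := by
  intro l
  induction l with
  | nil => simp
  | cons p l ih =>
    intro s acc
    simp only [List.foldl_cons]
    rw [ih]
    simp only [List.length_cons, List.range_succ_eq_map, List.map_cons, List.map_map]
    simp [Function.comp, add_assoc]

theorem pvPrefix_eq (pages : List Int) :
    pvPrefix pages = (List.range (pages.length + 1)).map (pvS pages) := by
  unfold pvPrefix
  rw [pv_scan_aux]
  simp only [List.range_succ_eq_map, List.map_cons, List.map_map]
  simp [Function.comp, pvS]

theorem pvPrefix_getD (pages : List Int) (i : ℕ) (hi : i ≤ pages.length) :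
    (pvPrefix pages).getD i 0 = pvS pages i := by
  rw [pvPrefix_eq]
  exact PySem.List.getD_map_range _ _ i 0 (by omega)

theorem pvBest_eq_mmS (pages : List Int) (r i : ℕ) (hi : i ≤ pages.length) :
    pvBest ((List.range (pages.length + 1)).map (mmS pages r)) (pvPrefix pages) i
      = mmS pages (r + 1) i := by
  show _ = pvFoldMin _ _
  unfold pvBest pvFoldMin
  apply PySem.List.foldl_congr_mem
  intro b j hj
  have hj' : j < pages.length + 1 := by
    have := List.mem_range.mp hj; omega
  rw [PySem.List.getD_map_range _ _ j none hj']
  rw [pvPrefix_getD pages i hi, pvPrefix_getD pages j (by omega)]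
  cases h2 : mmS pages r j <;> simp only [h2]

theorem pv_row0 (pages : List Int) :
    (some 0 :: List.replicate pages.length none : List (Option Int))
      = (List.range (pages.length + 1)).map (mmS pages 0) := by
  rw [List.range_succ_eq_map, List.map_cons, List.map_map]
  have h1 : mmS pages 0 0 = some 0 := by simp [mmS]
  have h2 : (List.range pages.length).map ((mmS pages 0) ∘ Nat.succ)
      = (List.range pages.length).map (fun _ => (none : Option Int)) := by
    apply List.map_congr_left
    intro x _
    simp [mmS]
  rw [h1, h2]
  simp

theorem alt_eq_mmS (pages : List Int) (k : Int) (h : pages ≠ []) :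
    copy_books_alt pages k
      = mmS pages (min k (pages.length : Int)).toNat pages.length := by
  unfold copy_books_alt
  rw [if_neg (by simpa using h)]
  show (((List.range (min k (pages.length:Int)).toNat).foldl
      (fun dp _ => (List.range (pages.length + 1)).map (fun i => pvBest dp (pvPrefix pages) i))
      (some 0 :: List.replicate pages.length none)).getD pages.length none) = _
  have iter : ∀ m : ℕ,
      (List.range m).foldl
        (fun dp _ => (List.range (pages.length + 1)).map (fun i => pvBest dp (pvPrefix pages) i))
        (some 0 :: List.replicate pages.length none)
      = (List.range (pages.length + 1)).map (mmS pages m) := by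
    intro m
    induction m with
    | zero => simpa using pv_row0 pages
    | succ m ih =>
      rw [show List.range (m+1) = List.range m ++ [m] from List.range_succ, List.foldl_append, ih]
      simp only [List.foldl_cons, List.foldl_nil]
      apply List.map_congr_left
      intro i hi
      exact pvBest_eq_mmS pages m i (by have := List.mem_range.mp hi; omega)
  rw [iter]
  exact PySem.List.getD_map_range _ _ pages.length none (by omega)

-- ---- partitions ----

/-- first `r` chunks split off at the front, each of sum ≤ t -/
def PartF : ℕ → Int → List Int → Prop
  | 0, _, l => l = []
  | r + 1, t, l => ∃ c d, l = c ++ d ∧ c.sum ≤ t ∧ PartF r t d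

/-- last chunk split off at the back (the dp's view) -/
def PartR : ℕ → Int → List Int → Prop
  | 0, _, l => l = []
  | r + 1, t, l => ∃ c d, l = c ++ d ∧ d.sum ≤ t ∧ PartR r t c

theorem PartR_cons_front {t : Int} {c : List Int} (hc : c.sum ≤ t) :
    ∀ r (d : List Int), PartR r t d → PartR (r + 1) t (c ++ d) := by
  intro r
  induction r with
  | zero =>
    intro d hd
    rw [show d = ([] : List Int) from hd]
    exact ⟨[], c, by simp, hc, rfl⟩
  | succ r ih =>
    rintro d ⟨a, b, rfl, hb, ha⟩
    exact ⟨c ++ a, b, by simp, hb, ih a ha⟩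

theorem PartF_snoc {t : Int} {d : List Int} (hd : d.sum ≤ t) :
    ∀ r (c : List Int), PartF r t c → PartF (r + 1) t (c ++ d) := by
  intro r
  induction r with
  | zero =>
    intro c hc
    rw [show c = ([] : List Int) from hc]
    exact ⟨d, [], by simp, hd, rfl⟩
  | succ r ih =>
    rintro c ⟨a, b, rfl, ha, hb⟩
    exact ⟨a, b ++ d, by simp, ha, ih b hb⟩

theorem PartF_of_PartR {t : Int} : ∀ r l, PartR r t l → PartF r t l := by
  intro r
  induction r with
  | zero => intro l h; exact h
  | succ r ih =>
    rintro l ⟨c, d, rfl, hd, hc⟩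
    exact PartF_snoc hd r c (ih c hc)

theorem PartR_of_PartF {t : Int} : ∀ r l, PartF r t l → PartR r t l := by
  intro r
  induction r with
  | zero => intro l h; exact h
  | succ r ih =>
    rintro l ⟨c, d, rfl, hc, hd⟩
    exact PartR_cons_front hc r d (ih d hd)

theorem PartF_mono_r {t : Int} (ht : 0 ≤ t) {r r' : ℕ} (hrr : r ≤ r') :
    ∀ l, PartF r t l → PartF r' t l := by
  induction hrr with
  | refl => exact fun l h => h
  | step h ih =>
    intro l hl
    exact ⟨[], l, by simp, by simpa, ih l hl⟩
theorem PartF_mono_t {s t : Int} (hst : s ≤ t) : ∀ r l, PartF r s l → PartF r t l := by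
  intro r
  induction r with
  | zero => exact fun l h => h
  | succ r ih =>
    rintro l ⟨c, d, rfl, hc, hd⟩
    exact ⟨c, d, rfl, le_trans hc hst, ih d hd⟩

theorem PartF_elem_le {t : Int} :
    ∀ r l, PartF r t l → (∀ p ∈ l, (0:Int) ≤ p) → ∀ p ∈ l, p ≤ t := by
  intro r
  induction r with
  | zero => rintro l rfl _ p hp; cases hp
  | succ r ih =>
    rintro l ⟨c, d, rfl, hc, hd⟩ hnn p hp
    rcases List.mem_append.mp hp with hp | hp
    · calc p ≤ c.sum := List.single_le_sum (fun x hx => hnn x (List.mem_append_left _ hx)) p hp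
        _ ≤ t := hc
    · exact ih d hd (fun x hx => hnn x (List.mem_append_right _ hx)) p hp

theorem PartF_singletons {t : Int} : ∀ l : List Int, (∀ p ∈ l, p ≤ t) → PartF l.length t l := by
  intro l
  induction l with
  | nil => intro _; rfl
  | cons p l ih =>
    intro h
    exact ⟨[p], l, rfl, by simpa using h p List.mem_cons_self,
      ih (fun x hx => h x (List.mem_cons_of_mem _ hx))⟩

-- ---- greedy (A's feasibility test) ----

/-- number of resets of A's greedy scan, `none` on a page exceeding the bound -/
def gAux : List Int → Int → Int → Option ℕ
  | [], _, _ => some 0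
  | p :: rest, c, t =>
    if p > t then none
    else if c + p > t then (gAux rest p t).map (· + 1)
    else gAux rest (c + p) t

/-- total version of the reset count (meaningful when every page ≤ t) -/
def gpF : List Int → Int → Int → ℕ
  | [], _, _ => 0
  | p :: rest, c, t => if c + p > t then gpF rest p t + 1 else gpF rest (c + p) t

theorem gAux_pages_le {t : Int} : ∀ (ps : List Int) (c : Int) (m : ℕ),
    gAux ps c t = some m → ∀ p ∈ ps, p ≤ t := by
  intro ps
  induction ps with
  | nil => intro _ _ _ p hp; cases hp
  | cons q rest ih =>
    intro c m h p hp
    rw [gAux] at h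
    split_ifs at h with h1 h2
    · rcases List.mem_cons.mp hp with rfl | hp
      · omega
      · rcases Option.map_eq_some_iff.mp h with ⟨m', hm', _⟩
        exact ih _ _ hm' p hp
    · rcases List.mem_cons.mp hp with rfl | hp
      · omega
      · exact ih _ _ h p hp

theorem gAux_total {t : Int} : ∀ (ps : List Int) (c : Int),
    (∀ p ∈ ps, p ≤ t) → gAux ps c t = some (gpF ps c t) := by
  intro ps
  induction ps with
  | nil => intro _ _; rfl
  | cons q rest ih =>
    intro c h
    have hq : q ≤ t := h q List.mem_cons_self
    have hrest : ∀ p ∈ rest, p ≤ t := fun p hp => h p (List.mem_cons_of_mem _ hp)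
    rw [gAux, gpF]
    rw [if_neg (by omega)]
    split_ifs with h2
    · rw [ih q hrest]; rfl
    · exact ih (c + q) hrest

theorem canAux_iff {k t : Int} : ∀ (ps : List Int) (c u : Int),
    canAux ps c u k t = true ↔ (ps = [] ∨ ∃ m : ℕ, gAux ps c t = some m ∧ u + (m : Int) ≤ k) := by
  intro ps
  induction ps with
  | nil => intro c u; simp [canAux]
  | cons q rest ih =>
    intro c u
    rw [canAux, gAux]
    split_ifs with h1 hr
    · simp
    · show (if u + 1 > k then false else canAux rest q (u + 1) k t) = true ↔ _
      split_ifs with hk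
      · simp only [false_iff]
        rintro (h | ⟨m, hm, hum⟩)
        · cases h
        · rcases Option.map_eq_some_iff.mp hm with ⟨m', hm', rfl⟩
          push_cast at hum
          omega
      · rw [ih]
        constructor
        · rintro (rfl | ⟨m', hm', hum⟩)
          · exact Or.inr ⟨1, by rw [show gAux ([] : List Int) q t = some 0 from rfl]; rfl, by push_cast; omega⟩
          · exact Or.inr ⟨m' + 1, by rw [hm']; rfl, by push_cast at hum ⊢; omega⟩
        · rintro (h | ⟨m, hm, hum⟩)
          · cases h
          · rcases Option.map_eq_some_iff.mp hm with ⟨m', hm', rfl⟩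
            exact Or.inr ⟨m', hm', by push_cast at hum ⊢; omega⟩
    · show (if u > k then false else canAux rest (c + q) u k t) = true ↔ _
      split_ifs with hk
      · simp only [false_iff]
        rintro (h | ⟨m, hm, hum⟩)
        · cases h
        · have : (0:Int) ≤ (m : Int) := by positivity
          omega
      · rw [ih]
        constructor
        · rintro (rfl | ⟨m', hm', hum⟩)
          · exact Or.inr ⟨0, rfl, by push_cast; omega⟩
          · exact Or.inr ⟨m', hm', hum⟩
        · rintro (h | ⟨m, hm, hum⟩)
          · cases h
          · exact Or.inr ⟨m, hm, hum⟩

/-- the two interleaved monotonicity facts about the greedy reset count -/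
theorem gpF_M {t : Int} : ∀ ps : List Int, (∀ p ∈ ps, (0:Int) ≤ p) →
    (∀ a b : Int, 0 ≤ b → a ≤ t → gpF ps a t ≤ 1 + gpF ps b t) ∧
    (∀ a b : Int, 0 ≤ a → a ≤ b → gpF ps a t ≤ gpF ps b t) := by
  intro ps
  induction ps with
  | nil => intro _; exact ⟨fun _ _ _ _ => by simp [gpF], fun _ _ _ _ => le_refl _⟩
  | cons p rest ih =>
    intro hnn
    have hp : (0:Int) ≤ p := hnn p List.mem_cons_self
    have hrest : ∀ x ∈ rest, (0:Int) ≤ x := fun x hx => hnn x (List.mem_cons_of_mem _ hx)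
    obtain ⟨ihM2, ihM1⟩ := ih hrest
    constructor
    · -- M2: a ≤ t, 0 ≤ b
      intro a b hb ha
      rw [gpF, gpF]
      split_ifs with hap hbp hbp
      · -- both reset
      -- gpF rest p + 1 ≤ 1 + (gpF rest p + 1)
        omega
      · -- a resets, b does not: gpF rest p + 1 ≤ 1 + gpF rest (b+p) via M1 p ≤ b+p
        have := ihM1 p (b + p) hp (by omega)
        omega
      · -- a no reset, b resets: gpF rest (a+p) ≤ 1 + (gpF rest p + 1): M2 at rest: a+p ≤ t, p ≥ 0
        have := ihM2 (a + p) p hp (by omega)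
        omega
      · -- neither resets: M2 at rest? need gpF rest (a+p) ≤ 1 + gpF rest (b+p): a+p ≤ t, b+p ≥ 0
        have := ihM2 (a + p) (b + p) (by omega) (by omega)
        omega
    · -- M1: 0 ≤ a ≤ b
      intro a b ha hab
      rw [gpF, gpF]
      split_ifs with hap hbp hbp
      · omega
      · -- a resets, b does not: impossible since a ≤ b
        omega
      · -- a no reset, b resets: gpF rest (a+p) ≤ 1 + gpF rest p : M2 (a+p ≤ t, p ≥ 0)
        have := ihM2 (a + p) p hp (by omega)
        omega
      · have := ihM1 (a + p) (b + p) (by omega) (by omega)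
        omega

theorem gpF_chunk_absorb {t : Int} : ∀ (ch : List Int) (rest : List Int) (c : Int),
    (∀ p ∈ ch, (0:Int) ≤ p) → 0 ≤ c → c + ch.sum ≤ t →
    gpF (ch ++ rest) c t = gpF rest (c + ch.sum) t := by
  intro ch
  induction ch with
  | nil => intro rest c _ _ _; simp
  | cons p ch ih =>
    intro rest c hnn hc hsum
    have hp : (0:Int) ≤ p := hnn p List.mem_cons_self
    have hch : ∀ x ∈ ch, (0:Int) ≤ x := fun x hx => hnn x (List.mem_cons_of_mem _ hx)
    have hchs : (0:Int) ≤ ch.sum := List.sum_nonneg hch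
    rw [List.cons_append, gpF, if_neg (by simp only [List.sum_cons] at hsum; omega)]
    rw [ih rest (c + p) hch (by omega) (by simp only [List.sum_cons] at hsum; omega)]
    congr 1
    simp only [List.sum_cons]
    ring

theorem gpF_chunk_step {t : Int} : ∀ (ch rest : List Int) (c : Int),
    (∀ p ∈ ch, (0:Int) ≤ p) → (∀ p ∈ rest, (0:Int) ≤ p) → ch.sum ≤ t → 0 ≤ c → c ≤ t →
    gpF (ch ++ rest) c t ≤ 1 + gpF rest ch.sum t := by
  intro ch
  induction ch with
  | nil =>
    intro rest c _ hrest _ hc hct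
    simp only [List.nil_append, List.sum_nil]
    exact (gpF_M rest hrest).1 c 0 le_rfl hct
  | cons p ch ih =>
    intro rest c hnn hrest hsum hc hct
    have hp : (0:Int) ≤ p := hnn p List.mem_cons_self
    have hch : ∀ x ∈ ch, (0:Int) ≤ x := fun x hx => hnn x (List.mem_cons_of_mem _ hx)
    have hchs : (0:Int) ≤ ch.sum := List.sum_nonneg hch
    simp only [List.sum_cons] at hsum ⊢
    rw [List.cons_append, gpF]
    split_ifs with hcp
    · -- reset: 1 + gpF (ch++rest) p, and p + ch.sum ≤ t so absorb
      rw [gpF_chunk_absorb ch rest p hch hp (by omega)]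
      omega
    · -- no reset
      have h1 := ih rest (c + p) hch hrest (by omega) (by omega) (by omega)
      have h2 := (gpF_M (t := t) rest hrest).2 ch.sum (p + ch.sum) hchs (by omega)
      omega

theorem greedy_to_part {t : Int} : ∀ (ps : List Int) (c : Int),
    (∀ p ∈ ps, p ≤ t) → c ≤ t →
    ∃ ch rest, ps = ch ++ rest ∧ c + ch.sum ≤ t ∧ PartF (gpF ps c t) t rest := by
  intro ps
  induction ps with
  | nil => intro c _ hc; exact ⟨[], [], rfl, by simpa, rfl⟩
  | cons p ps ih =>
    intro c hle hc
    have hp : p ≤ t := hle p List.mem_cons_self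
    have hps : ∀ x ∈ ps, x ≤ t := fun x hx => hle x (List.mem_cons_of_mem _ hx)
    rw [gpF]
    split_ifs with hcp
    · -- reset
      obtain ⟨ch, rest, rfl, hchs, hpart⟩ := ih p hps hp
      refine ⟨[], p :: (ch ++ rest), rfl, by simpa, ?_⟩
      exact ⟨p :: ch, rest, by simp, by simpa using hchs, hpart⟩
    · -- extend
      obtain ⟨ch, rest, rfl, hchs, hpart⟩ := ih (c + p) hps (by omega)
      exact ⟨p :: ch, rest, by simp, by simp only [List.sum_cons]; omega, hpart⟩

theorem part_to_greedy {t : Int} : ∀ (r : ℕ) (l : List Int) (c : Int),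
    PartF r t l → (∀ p ∈ l, (0:Int) ≤ p) → 0 ≤ c → c ≤ t →
    gpF l c t ≤ r := by
  intro r
  induction r with
  | zero => rintro l c rfl _ _ _; simp [gpF]
  | succ r ih =>
    rintro l c ⟨ch, d, rfl, hch, hd⟩ hnn hc hct
    have hchn : ∀ x ∈ ch, (0:Int) ≤ x := fun x hx => hnn x (List.mem_append_left _ hx)
    have hdn : ∀ x ∈ d, (0:Int) ≤ x := fun x hx => hnn x (List.mem_append_right _ hx)
    have h1 := gpF_chunk_step ch d c hchn hdn hch hc hct
    have h2 := ih d ch.sum hd hdn (List.sum_nonneg hchn) hch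
    omega

-- ---- characterisation of A's feasibility test on the natural domain ----

theorem can_iff_part {pages : List Int} {k t : Int}
    (hne : pages ≠ []) (hnn : ∀ p ∈ pages, (0:Int) ≤ p) (ht : 0 ≤ t) (_hk : 1 ≤ k) :
    can_copy_books pages k t = true ↔ ∃ r : ℕ, (r : Int) ≤ k ∧ PartF r t pages := by
  unfold can_copy_books
  rw [canAux_iff]
  constructor
  · rintro (rfl | ⟨m, hm, hmk⟩)
    · exact absurd rfl hne
    · have hle := gAux_pages_le pages 0 m hm
      obtain ⟨ch, rest, heq, hchs, hpart⟩ := greedy_to_part pages 0 hle ht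
      have hmeq : gpF pages 0 t = m := by
        have h2 := gAux_total pages 0 hle
        rw [h2] at hm
        injection hm
      refine ⟨m + 1, by push_cast; omega, ?_⟩
      exact ⟨ch, rest, heq, by simpa using hchs, hmeq ▸ hpart⟩
  · rintro ⟨r, hrk, hpart⟩
    have hle := PartF_elem_le r pages hpart hnn
    right
    refine ⟨gpF pages 0 t, gAux_total pages 0 hle, ?_⟩
    cases r with
    | zero => exact absurd hpart hne
    | succ r' =>
      obtain ⟨ch, d, rfl, hch, hd⟩ := hpart
      have hchn : ∀ x ∈ ch, (0:Int) ≤ x := fun x hx => hnn x (List.mem_append_left _ hx)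
      have hdn : ∀ x ∈ d, (0:Int) ≤ x := fun x hx => hnn x (List.mem_append_right _ hx)
      rw [gpF_chunk_absorb ch d 0 hchn le_rfl (by simpa using hch)]
      have h2 := part_to_greedy r' d (0 + ch.sum) hd hdn
        (by have := List.sum_nonneg hchn; omega) (by simpa using hch)
      push_cast at hrk ⊢
      omega

theorem can_neg {pages : List Int} {k t : Int}
    (hne : pages ≠ []) (hnn : ∀ p ∈ pages, (0:Int) ≤ p) (ht : t < 0) :
    can_copy_books pages k t = false := by
  obtain ⟨p, rest, rfl⟩ := List.exists_cons_of_ne_nil hne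
  unfold can_copy_books
  rw [canAux, if_pos (by have := hnn p List.mem_cons_self; omega)]

theorem can_mono {pages : List Int} {k s t : Int}
    (hne : pages ≠ []) (hnn : ∀ p ∈ pages, (0:Int) ≤ p) (hk : 1 ≤ k)
    (hs : 0 ≤ s) (hst : s ≤ t) (h : can_copy_books pages k s = true) :
    can_copy_books pages k t = true := by
  obtain ⟨r, hrk, hpart⟩ := (can_iff_part hne hnn hs hk).mp h
  exact (can_iff_part hne hnn (le_trans hs hst) hk).mpr ⟨r, hrk, PartF_mono_t hst r pages hpart⟩

theorem can_k_nonpos {pages : List Int} {k t : Int} (hne : pages ≠ []) (hk : k ≤ 0) :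
    can_copy_books pages k t = false := by
  rw [Bool.eq_false_iff]
  intro h
  rcases (canAux_iff pages 0 1).mp h with rfl | ⟨m, _, hm⟩
  · exact hne rfl
  · have : (0:Int) ≤ (m : Int) := by positivity
    omega

-- ---- the binary search finds the least feasible time ----

theorem bsLoop_spec {pages : List Int} {k : Int}
    (hmono : ∀ s t : Int, 0 ≤ s → s ≤ t → can_copy_books pages k s = true → can_copy_books pages k t = true)
    (hneg : ∀ s : Int, s < 0 → can_copy_books pages k s = false) :
    ∀ l r : Int, 0 ≤ l → l ≤ r → (∀ s, s < l → can_copy_books pages k s = false) →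
      can_copy_books pages k r = true →
      0 ≤ (bsLoop pages k l r).1 ∧
      (∀ s, s < (bsLoop pages k l r).1 → can_copy_books pages k s = false) ∧
      can_copy_books pages k (bsLoop pages k l r).2 = true ∧
      (bsLoop pages k l r).1 ≤ (bsLoop pages k l r).2 ∧
      (bsLoop pages k l r).2 ≤ (bsLoop pages k l r).1 + 1 := by
  intro l r
  induction l, r using bsLoop.induct pages k with
  | case1 l r hlt middle hcan ih =>
    intro h0 hlr hbelow hr
    rw [bsLoop, if_pos hlt, if_pos hcan]
    have hmid : middle = (l + r) / 2 := PySem.Int.floordiv_eq_ediv_of_pos (by norm_num)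
    exact ih h0 (by omega) hbelow hcan
  | case2 l r hlt middle hcan ih =>
    intro h0 hlr hbelow hr
    rw [bsLoop, if_pos hlt, if_neg hcan]
    have hmid : middle = (l + r) / 2 := PySem.Int.floordiv_eq_ediv_of_pos (by norm_num)
    refine ih (by omega) (by omega) ?_ hr
    intro s hs
    rcases lt_or_ge s 0 with hs0 | hs0
    · exact hneg s hs0
    · rcases Bool.eq_false_or_eq_true (can_copy_books pages k s) with hF | hF
      · exact absurd (hmono s middle (by omega) (by omega) hF) hcan
      · exact hF
  | case3 l r hlt =>
    intro h0 hlr hbelow hr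
    rw [bsLoop, if_neg hlt]
    exact ⟨h0, hbelow, hr, by simpa using hlr, by simp; omega⟩

theorem copy_books_least {pages : List Int} {k : Int}
    (hne : pages ≠ []) (hnn : ∀ p ∈ pages, (0:Int) ≤ p) (hk : 1 ≤ k) :
    ∃ T : Int, copy_books pages k = some T ∧ 0 ≤ T ∧ can_copy_books pages k T = true ∧
      ∀ s, 0 ≤ s → s < T → can_copy_books pages k s = false := by
  have hmono : ∀ s t : Int, 0 ≤ s → s ≤ t → can_copy_books pages k s = true → can_copy_books pages k t = true :=
    fun s t hs hst h => can_mono hne hnn hk hs hst h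
  have hneg : ∀ s : Int, s < 0 → can_copy_books pages k s = false :=
    fun s hs => can_neg hne hnn hs
  have hsum0 : (0:Int) ≤ pages.sum := List.sum_nonneg hnn
  have hFsum : can_copy_books pages k pages.sum = true :=
    (can_iff_part hne hnn hsum0 hk).mpr ⟨1, by exact_mod_cast hk, ⟨pages, [], by simp, le_refl _, rfl⟩⟩
  obtain ⟨h0, hbel, hr2, hle, hle1⟩ :=
    bsLoop_spec hmono hneg 0 pages.sum le_rfl hsum0 (fun s hs => hneg s hs) hFsum
  unfold copy_books
  rw [if_neg (by simpa using hne)]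
  show ∃ T, (if can_copy_books pages k (bsLoop pages k 0 pages.sum).1 = true
      then some (bsLoop pages k 0 pages.sum).1
      else if can_copy_books pages k (bsLoop pages k 0 pages.sum).2 = true
        then some (bsLoop pages k 0 pages.sum).2 else none) = some T ∧
    0 ≤ T ∧ can_copy_books pages k T = true ∧ ∀ s, 0 ≤ s → s < T → can_copy_books pages k s = false
  rcases Bool.eq_false_or_eq_true (can_copy_books pages k (bsLoop pages k 0 pages.sum).1) with hcl | hcl
  · rw [if_pos hcl]
    exact ⟨(bsLoop pages k 0 pages.sum).1, rfl, h0, hcl, fun s _ hs => hbel s hs⟩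
  · rw [if_neg (by simp [hcl]), if_pos hr2]
    refine ⟨(bsLoop pages k 0 pages.sum).2, rfl, by omega, hr2, ?_⟩
    intro s hs0 hs
    rcases lt_or_ge s (bsLoop pages k 0 pages.sum).1 with h | h
    · exact hbel s h
    · have : s = (bsLoop pages k 0 pages.sum).1 := by omega
      rw [this]
      exact hcl

-- ---- the dp computes the same least feasible time ----

theorem mmS_nonneg {pages : List Int} : ∀ (r i : ℕ) (v : Int),
    mmS pages r i = some v → 0 ≤ v := by
  intro r
  induction r with
  | zero =>
    intro i v h
    rw [mmS] at h
    split_ifs at h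
    injection h with e
    omega
  | succ r ih =>
    intro i v h
    rw [mmS] at h
    obtain ⟨⟨j, hj, hfj⟩, _⟩ := pvFoldMin_some _ _ _ h
    cases hm : mmS pages r j with
    | none => rw [hm] at hfj; cases hfj
    | some w =>
      rw [hm] at hfj
      injection hfj with e
      have := ih j w hm
      have : w ≤ v := by rw [← e]; exact le_max_left _ _
      omega

theorem take_decomp_sum {pages : List Int} {i j : ℕ} (hj : j ≤ i) (_hi : i ≤ pages.length) :
    pages.take i = pages.take j ++ (pages.take i).drop j ∧
      ((pages.take i).drop j).sum = pvS pages i - pvS pages j := by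
  have h1 : (pages.take i).take j = pages.take j := by
    rw [List.take_take, min_eq_left hj]
  constructor
  · conv_lhs => rw [← List.take_append_drop j (pages.take i)]
    rw [h1]
  · have h2 : (pages.take j).sum + ((pages.take i).drop j).sum = pvS pages i := by
      rw [← List.sum_append]
      conv_rhs => rw [pvS, ← List.take_append_drop j (pages.take i)]
      rw [h1]
    unfold pvS at h2 ⊢
    omega

theorem mmS_iff_partR {pages : List Int} : ∀ (r i : ℕ) (t : Int), i ≤ pages.length → 0 ≤ t →
    ((∃ v, mmS pages r i = some v ∧ v ≤ t) ↔ PartR r t (pages.take i)) := by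
  intro r
  induction r with
  | zero =>
    intro i t hi ht
    rw [mmS]
    cases i with
    | zero => simp [PartR, ht]
    | succ i =>
      rw [if_neg (by omega)]
      constructor
      · rintro ⟨v, hv, _⟩; cases hv
      · intro h
        exfalso
        have : pages.take (i + 1) = [] := h
        have := List.take_eq_nil_iff.mp this
        rcases this with h' | h'
        · cases h'
        · subst h'; simp at hi
  | succ r ih =>
    intro i t hi ht
    rw [mmS]
    constructor
    · rintro ⟨v, hv, hvt⟩
      obtain ⟨⟨j, hj, hfj⟩, _⟩ := pvFoldMin_some _ _ _ hv
      have hji : j ≤ i := by have := List.mem_range.mp hj; omega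
      cases hm : mmS pages r j with
      | none => rw [hm] at hfj; cases hfj
      | some w =>
        rw [hm] at hfj
        injection hfj with e
        have hwt : w ≤ t := by
          have : w ≤ v := by rw [← e]; exact le_max_left _ _
          omega
        have hseg : pvS pages i - pvS pages j ≤ t := by
          have : pvS pages i - pvS pages j ≤ v := by rw [← e]; exact le_max_right _ _
          omega
        obtain ⟨hdec, hsum⟩ := take_decomp_sum hji hi
        have hpr : PartR r t (pages.take j) := (ih j t (by omega) ht).mp ⟨w, hm, hwt⟩
        exact ⟨pages.take j, (pages.take i).drop j, hdec, by omega, hpr⟩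
    · rintro ⟨c, d, hcd, hd, hc⟩
      have hjlen : c.length ≤ i := by
        have := congrArg List.length hcd
        simp at this
        omega
      have hc' : c = pages.take c.length := by
        have h0 := congrArg (List.take c.length) hcd
        rw [List.take_left] at h0
        rw [List.take_take, min_eq_left hjlen] at h0
        exact h0.symm
      obtain ⟨hdec, hsum⟩ := take_decomp_sum hjlen hi
      rw [← hc'] at hdec
      have hdsum : d.sum = pvS pages i - pvS pages c.length := by
        have h3 : d = (pages.take i).drop c.length :=
          List.append_cancel_left (hcd.symm.trans hdec)
        rw [h3, hsum]
      obtain ⟨w, hw, hwt⟩ := (ih c.length t (by omega) ht).mpr (hc' ▸ hc)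
      have hfc : (fun j => match mmS pages r j with
          | none => none
          | some w => some (max w (pvS pages i - pvS pages j))) c.length
          = some (max w (pvS pages i - pvS pages c.length)) := by
        simp only [hw]
      obtain ⟨v, hv, hvle⟩ := pvFoldMin_le (fun j => match mmS pages r j with
          | none => none
          | some w => some (max w (pvS pages i - pvS pages j)))
        (List.range (i + 1)) c.length (max w (pvS pages i - pvS pages c.length))
        (List.mem_range.mpr (by omega)) hfc
      exact ⟨v, hv, le_trans hvle (max_le hwt (by omega))⟩

-- ---- main assembly ----

theorem copy_books_eq_alt (pages : List Int) (k : Int) (h : Pre_copy_books pages k) :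
    copy_books pages k = copy_books_alt pages k := by
  by_cases hemp : pages = []
  · subst hemp; rfl
  · by_cases hk0 : k ≤ 0
    · have hcan : ∀ t, can_copy_books pages k t = false := fun t => can_k_nonpos hemp hk0
      have hA : copy_books pages k = none := by
        unfold copy_books
        rw [if_neg (by simpa using hemp)]
        show (if can_copy_books pages k (bsLoop pages k 0 pages.sum).1 = true
            then some (bsLoop pages k 0 pages.sum).1
            else if can_copy_books pages k (bsLoop pages k 0 pages.sum).2 = true
              then some (bsLoop pages k 0 pages.sum).2 else none) = none
        rw [hcan, hcan]
        simp
      have hB : copy_books_alt pages k = none := by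
        rw [alt_eq_mmS pages k hemp]
        have hm0 : (min k (pages.length : Int)).toNat = 0 :=
          Int.toNat_of_nonpos (le_trans (min_le_left _ _) hk0)
        rw [hm0, mmS]
        rw [if_neg (by simpa using hemp)]
      rw [hA, hB]
    · have hnn : ∀ p ∈ pages, (0:Int) ≤ p := by
        rcases h with h | h | h
        · exact absurd h hemp
        · exact absurd h hk0
        · exact h
      have hk : 1 ≤ k := by omega
      obtain ⟨T, hA, hT0, hFT, hmin⟩ := copy_books_least hemp hnn hk
      rw [alt_eq_mmS pages k hemp, hA]
      set m := (min k (pages.length : Int)).toNat with hm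
      have hmin0 : (0:Int) ≤ min k (pages.length : Int) := le_min (by omega) (by positivity)
      have hmk : (m : Int) ≤ k := by
        rw [hm, Int.toNat_of_nonneg hmin0]
        exact min_le_left _ _
      obtain ⟨r, hrk, hpart⟩ := (can_iff_part hemp hnn hT0 hk).mp hFT
      have hel : ∀ p ∈ pages, p ≤ T := PartF_elem_le r pages hpart hnn
      have hmm : PartF m T pages := by
        rcases le_total k (pages.length : Int) with hc | hc
        · refine PartF_mono_r hT0 (show r ≤ m by
            have h2 : (r:Int) ≤ (m:Int) := by
              rw [hm, Int.toNat_of_nonneg hmin0, min_eq_left hc]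
              exact hrk
            exact_mod_cast h2) pages hpart
        · have hmL : m = pages.length := by
            rw [hm, min_eq_right hc]
            exact Int.toNat_natCast _
          rw [hmL]
          exact PartF_singletons pages hel
      have hR : PartR m T (pages.take pages.length) := by
        rw [List.take_length]
        exact PartR_of_PartF m pages hmm
      obtain ⟨v, hv, hvT⟩ := (mmS_iff_partR m pages.length T le_rfl hT0).mpr hR
      have hv0 : (0:Int) ≤ v := mmS_nonneg m pages.length v hv
      have hFv : can_copy_books pages k v = true := by
        have hRv := (mmS_iff_partR m pages.length v le_rfl hv0).mp ⟨v, hv, le_rfl⟩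
        rw [List.take_length] at hRv
        exact (can_iff_part hemp hnn hv0 hk).mpr ⟨m, hmk, PartF_of_PartR m pages hRv⟩
      have hTv : T ≤ v := by
        by_contra hlt
        have h3 := hmin v hv0 (by omega)
        rw [hFv] at h3
        cases h3
      rw [hv, le_antisymm hvT hTv]

-- ===== VERDICT (by name: the statement is the Claim_ definition above) =====
theorem copy_books_spec : Claim_equal_copy_books := by
  intro pages k _ hpre
  unfold Spec_copy_books
  exact copy_books_eq_alt pages k hpre
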